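-- pv_equiv track=rewrite | github.com/shahhassansh/Python_Coding_Practice | calc_drone_min_energy.py | calc_drone_min_energy
-- ===== SOURCE A (Python) =====
-- def calc_drone_min_energy(route):
--   ans = 0
--   diff_z = 0
--   z = route[0][2]
--   for i in range(1,len(route)):
--     diff_z = diff_z + (z - route[i][2])
--     z = route[i][2]
--     ans = min(ans,diff_z)
--   return -1*ans
-- ===== SOURCE B (Python) =====
-- def calc_drone_min_energy(route):
--   z0 = route[0][2]
--   return max(0, max(p[2] for p in route) - z0)
-- ===== Notes on version B (the rewrite author's own statement) =====
-- stated objective: simpler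
-- what changed: Replaced the running min/telescoping-difference accumulator loop with the closed form max(0, max altitude - starting altitude), since the accumulated diff_z at step i telescopes to route[0][2] - route[i][2].
import Mathlib
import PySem

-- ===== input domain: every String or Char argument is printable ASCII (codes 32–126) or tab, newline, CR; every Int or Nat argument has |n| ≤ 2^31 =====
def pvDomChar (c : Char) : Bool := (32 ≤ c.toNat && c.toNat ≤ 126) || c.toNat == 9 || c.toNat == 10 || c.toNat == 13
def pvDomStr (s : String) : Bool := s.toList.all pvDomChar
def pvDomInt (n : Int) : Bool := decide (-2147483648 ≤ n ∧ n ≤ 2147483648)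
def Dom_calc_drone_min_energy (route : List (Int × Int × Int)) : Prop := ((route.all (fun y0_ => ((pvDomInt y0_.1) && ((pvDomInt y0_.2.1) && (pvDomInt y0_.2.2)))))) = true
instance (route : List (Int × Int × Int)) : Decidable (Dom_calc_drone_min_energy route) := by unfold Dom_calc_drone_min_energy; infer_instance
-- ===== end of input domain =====

-- B replaces A's running-min/telescoping accumulator loop with the closed form
-- max(0, max altitude - starting altitude); objective: simpler.

-- ===== PORT A =====
-- A's loop over route[1:] keeps (ans, diff_z, z); ported as a foldl over the tail.
def calc_drone_min_energy (route : List (Int × Int × Int)) : Int :=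
  match route with
  | [] => 0  -- Python raises IndexError on route[0]; excluded by Pre_
  | p0 :: rest =>
    let s := rest.foldl
      (fun (st : Int × Int × Int) p =>
        let diff_z := st.2.1 + (st.2.2 - p.2.2)
        (min st.1 diff_z, diff_z, p.2.2))
      (0, 0, p0.2.2);
    -1 * s.1

-- ===== PORT B =====
def calc_drone_min_energy_alt (route : List (Int × Int × Int)) : Int :=
  match route with
  | [] => 0  -- Python raises IndexError on route[0]; excluded by Pre_
  | p0 :: rest =>
    let m := rest.foldl (fun acc p => max acc p.2.2) p0.2.2  -- max(p[2] for p in route)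
    max 0 (m - p0.2.2)

-- ===== PRECONDITION & SPEC =====
-- Both Pythons raise IndexError on an empty route (route[0]); Pre_ excludes exactly that.
def Pre_calc_drone_min_energy (route : List (Int × Int × Int)) : Prop := route ≠ []
instance (route : List (Int × Int × Int)) : Decidable (Pre_calc_drone_min_energy route) := by unfold Pre_calc_drone_min_energy; infer_instance
def pvWitness_calc_drone_min_energy : (List (Int × Int × Int)) := [(0, 0, 3), (1, 1, 7), (2, 2, 5)]

def Spec_calc_drone_min_energy (route : List (Int × Int × Int)) (out : Int) : Prop := out = calc_drone_min_energy_alt route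
instance (route : List (Int × Int × Int)) (out : Int) : Decidable (Spec_calc_drone_min_energy route out) := by unfold Spec_calc_drone_min_energy; infer_instance

-- ===== CLAIM (what is proved, stated in full; the proofs are below) =====
def Claim_equal_calc_drone_min_energy : Prop := ∀ (route : List (Int × Int × Int)), Dom_calc_drone_min_energy route → Pre_calc_drone_min_energy route → Spec_calc_drone_min_energy route (calc_drone_min_energy route)

-- ===== LEMMAS AND PROOFS =====

-- A's fold, projected to ans, is a fold of min over the telescoped differences c - p.2.2
-- where c = diff_z + z stays invariant.
theorem loopA_telescope (rest : List (Int × Int × Int)) :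
    ∀ (ans d z : Int),
      (rest.foldl
        (fun (st : Int × Int × Int) p =>
          let diff_z := st.2.1 + (st.2.2 - p.2.2)
          (min st.1 diff_z, diff_z, p.2.2))
        (ans, d, z)).1
      = rest.foldl (fun a p => min a ((d + z) - p.2.2)) ans := by
  induction rest with
  | nil => intro ans d z; rfl
  | cons p t ih =>
    intro ans d z
    simp only [List.foldl_cons]
    have h := ih (min ans (d + (z - p.2.2))) (d + (z - p.2.2)) p.2.2
    simp only [show d + z - p.2.2 + p.2.2 = d + z from by ring,
      show d + (z - p.2.2) = d + z - p.2.2 from by ring] at h ⊢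
    exact h

-- a min-fold of c - p.2.2 equals c minus the max-fold of p.2.2
theorem minfold_maxfold (rest : List (Int × Int × Int)) (c : Int) :
    ∀ (ans m : Int),
      rest.foldl (fun a p => min a (c - p.2.2)) (min ans (c - m))
      = min ans (c - rest.foldl (fun acc p => max acc p.2.2) m) := by
  induction rest with
  | nil => intro ans m; rfl
  | cons p t ih =>
    intro ans m
    simp only [List.foldl_cons]
    have e : min (min ans (c - m)) (c - p.2.2) = min ans (c - max m p.2.2) := by omega
    rw [e, ih ans (max m p.2.2)]

-- ===== VERDICT (by name: the statement is the Claim_ definition above) =====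
theorem calc_drone_min_energy_spec : Claim_equal_calc_drone_min_energy := by
  intro route _ hpre
  unfold Spec_calc_drone_min_energy
  match route with
  | [] => exact absurd rfl hpre
  | p0 :: rest =>
    unfold calc_drone_min_energy calc_drone_min_energy_alt
    simp only
    rw [loopA_telescope rest 0 0 p0.2.2]
    have h1 := minfold_maxfold rest (0 + p0.2.2) 0 p0.2.2
    rw [show min (0:Int) (0 + p0.2.2 - p0.2.2) = 0 from by omega] at h1
    rw [h1]
    omega
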